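-- pv_equiv track=rewrite | github.com/serrasqueiro/tinycode | devcode/cvs_touch.py | after_blank
-- ===== SOURCE A (Python) =====
-- def after_blank(alist) -> list:
--     """ Returns the list after the last blank. """
--     idx = 0
--     while idx < len(alist):
--         if alist[idx] == "":
--             idx += 1
--             for item in alist[idx:]:
--                 if item:
--                     return alist[idx:]
--                 idx += 1
--         idx += 1
--     assert False
--     return list()
-- ===== SOURCE B (Python) =====
-- def after_blank(alist) -> list:
--     """ Returns the list after the last blank. """
--     tail = alist[alist.index("") + 1:]
--     while tail and not tail[0]:
--         tail = tail[1:]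
--     assert tail
--     return tail
-- ===== Notes on version B (the rewrite author's own statement) =====
-- stated objective: simpler
-- what changed: Replaces the nested while/for with a shared mutable index by three separated phases: list.index to find the first blank, a slice, and one loop stripping leading blanks from the tail.
import Mathlib
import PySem

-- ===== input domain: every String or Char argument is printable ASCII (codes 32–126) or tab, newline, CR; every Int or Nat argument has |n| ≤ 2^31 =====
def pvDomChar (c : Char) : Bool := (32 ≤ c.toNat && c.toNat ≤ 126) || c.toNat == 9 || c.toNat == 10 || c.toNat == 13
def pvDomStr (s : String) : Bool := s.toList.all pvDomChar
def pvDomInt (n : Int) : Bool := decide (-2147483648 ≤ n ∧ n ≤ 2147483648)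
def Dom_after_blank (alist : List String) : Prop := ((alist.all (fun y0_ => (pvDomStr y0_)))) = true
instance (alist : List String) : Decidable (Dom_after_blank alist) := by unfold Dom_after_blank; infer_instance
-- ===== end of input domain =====

-- B replaces A's nested while/for with a shared mutable index by three separated
-- phases (find first blank with .index, slice, strip leading blanks): simpler.


-- ===== PORT A =====
-- inner 'for item in alist[idx:]': returns some (alist[idx:]) at the first truthy
-- item, none when the loop exhausts the slice
def innerA (alist : List String) (items : List String) (idx : Nat) : Option (List String) :=
  match items with
  | [] => none
  | item :: rest =>
    if item ≠ "" then some (PySem.List.slice alist (some (idx : Int)) none)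
    else innerA alist rest (idx + 1)

-- outer 'while idx < len(alist)'; both 'assert False' exits yield [] (excluded by Pre_)
def outerA (alist : List String) (idx : Nat) : List String :=
  if h : idx < alist.length then
    if alist[idx] = "" then
      match innerA alist (PySem.List.slice alist (some ((idx + 1 : Nat) : Int)) none) (idx + 1) with
      | some r => r
      | none => []   -- inner loop exhausted, outer loop then exits: assert False
    else outerA alist (idx + 1)
  else []            -- assert False
termination_by alist.length - idx

def after_blank (alist : List String) : List String := outerA alist 0

-- ===== PORT B =====
-- 'while tail and not tail[0]: tail = tail[1:]'
def dropLeadingBlanks : List String → List String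
  | [] => []
  | s :: rest => if s = "" then dropLeadingBlanks rest else s :: rest

def after_blank_alt (alist : List String) : List String :=
  match PySem.List.index? alist "" with
  | none => []     -- alist.index("") raises ValueError (excluded by Pre_)
  | some i => dropLeadingBlanks (PySem.List.slice alist (some ((i + 1 : Nat) : Int)) none)
  -- 'assert tail' raises exactly when this result is [] (excluded by Pre_)

-- ===== PRECONDITION & SPEC =====
-- Pre_: the inputs on which the Python A returns normally — some element is ""
-- and some later element is non-empty; otherwise A hits 'assert False' (and B raises too).
def Pre_after_blank (alist : List String) : Prop :=
  ∃ i : Fin alist.length, alist[i] = "" ∧ ∃ j : Fin alist.length, (i : Nat) < (j : Nat) ∧ alist[j] ≠ ""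
instance (alist : List String) : Decidable (Pre_after_blank alist) := by unfold Pre_after_blank; infer_instance
def pvWitness_after_blank : List String := (["a", "", "b"])
def Spec_after_blank (alist : List String) (out : List String) : Prop := out = after_blank_alt alist
instance (alist : List String) (out : List String) : Decidable (Spec_after_blank alist out) := by unfold Spec_after_blank; infer_instance

-- ===== CLAIM (what is proved, stated in full; the proofs are below) =====
def Claim_equal_after_blank : Prop := ∀ (alist : List String), Dom_after_blank alist → Pre_after_blank alist → Spec_after_blank alist (after_blank alist)

-- ===== LEMMAS AND PROOFS =====

-- the inner for-loop, launched on items = alist.drop idx, computes dropLeadingBlanks items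
lemma innerA_eq (alist : List String) :
    ∀ (items : List String) (idx : Nat), items = alist.drop idx →
      (match innerA alist items idx with
       | some r => r
       | none => ([] : List String)) = dropLeadingBlanks items := by
  intro items
  induction items with
  | nil => intro idx _; simp [innerA, dropLeadingBlanks]
  | cons item rest ih =>
    intro idx hitems
    by_cases hblank : item = ""
    · subst hblank
      have hrest : rest = alist.drop (idx + 1) := by
        have := congrArg List.tail hitems
        simpa [List.tail_drop] using this
      simpa [innerA, dropLeadingBlanks] using ih (idx + 1) hrest
    · simp [innerA, hblank, dropLeadingBlanks, PySem.List.slice_from_natCast, ← hitems]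

-- the outer while-loop from index idx, characterised via the first "" of alist.drop idx
lemma outerA_eq (alist : List String) : ∀ (idx : Nat),
    outerA alist idx =
      match PySem.List.index? (alist.drop idx) "" with
      | none => []
      | some k => dropLeadingBlanks (alist.drop (idx + k + 1)) := by
  intro idx
  induction idx using outerA.induct alist with
  | case1 idx h hblank r hinner =>
    have hdrop : alist.drop idx = "" :: alist.drop (idx + 1) := by
      rw [List.drop_eq_getElem_cons h, hblank]
    rw [PySem.List.slice_from_natCast] at hinner
    have he := innerA_eq alist (alist.drop (idx + 1)) (idx + 1) rfl
    rw [hinner] at he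
    rw [outerA, dif_pos h, if_pos hblank, PySem.List.slice_from_natCast, hinner,
      hdrop, PySem.List.index?_cons_self]
    simpa using he
  | case2 idx h hblank hinner =>
    have hdrop : alist.drop idx = "" :: alist.drop (idx + 1) := by
      rw [List.drop_eq_getElem_cons h, hblank]
    rw [PySem.List.slice_from_natCast] at hinner
    have he := innerA_eq alist (alist.drop (idx + 1)) (idx + 1) rfl
    rw [hinner] at he
    rw [outerA, dif_pos h, if_pos hblank, PySem.List.slice_from_natCast, hinner,
      hdrop, PySem.List.index?_cons_self]
    simpa using he
  | case3 idx h hblank ih =>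
    have hdrop : alist.drop idx = alist[idx] :: alist.drop (idx + 1) := by
      rw [List.drop_eq_getElem_cons h]
    rw [outerA, dif_pos h, if_neg hblank, ih, hdrop,
      PySem.List.index?_cons_of_ne _ hblank]
    cases hk : PySem.List.index? (alist.drop (idx + 1)) "" with
    | none => rfl
    | some k =>
      simp only [Option.map_some]
      congr 2
      omega
  | case4 idx h =>
    have hdrop : alist.drop idx = [] := List.drop_eq_nil_of_le (by omega)
    rw [outerA, dif_neg h, hdrop]
    rfl

-- ===== VERDICT (by name: the statement is the Claim_ definition above) =====
theorem after_blank_spec : Claim_equal_after_blank := by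
  intro alist _hdom _hpre
  unfold Spec_after_blank after_blank after_blank_alt
  rw [outerA_eq alist 0]
  simp only [List.drop_zero]
  cases h : PySem.List.index? alist "" with
  | none => rfl
  | some i =>
    show dropLeadingBlanks (alist.drop (0 + i + 1)) =
      dropLeadingBlanks (PySem.List.slice alist (some ((i + 1 : Nat) : Int)) none)
    rw [PySem.List.slice_from_natCast]
    norm_num
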